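-- pv_equiv track=rewrite | github.com/thomaskettunen/symk-groupings | experiments/RunTimeAnalysis.py | CountUnsolved
-- ===== SOURCE A (Python) =====
-- def CountUnsolved(times):
--     both_unsolved = 0
--     unsolved_1 = 0
--     unsolved_2 = 0
--     for task in times:
--         if task[0] == 600 and task[1] == 600:
--             both_unsolved+= 1
--         elif task[0] == 600:
--             unsolved_1 += 1
--         elif task[1] == 600:
--             unsolved_2 += 1
--     return both_unsolved, unsolved_1, unsolved_2
-- ===== SOURCE B (Python) =====
-- def CountUnsolved(times):
--     both = sum(1 for task in times if task[0] == 600 and task[1] == 600)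
--     c0 = sum(1 for task in times if task[0] == 600)
--     c1 = sum(1 for task in times if task[1] == 600)
--     return both, c0 - both, c1 - both
-- ===== Notes on version B (the rewrite author's own statement) =====
-- stated objective: alternative
-- what changed: B computes three overlapping marginal counts (fst==600, snd==600, both) in separate passes and derives the disjoint buckets by inclusion-exclusion, instead of A's single loop maintaining three disjoint counters via an elif cascade.
import Mathlib
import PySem

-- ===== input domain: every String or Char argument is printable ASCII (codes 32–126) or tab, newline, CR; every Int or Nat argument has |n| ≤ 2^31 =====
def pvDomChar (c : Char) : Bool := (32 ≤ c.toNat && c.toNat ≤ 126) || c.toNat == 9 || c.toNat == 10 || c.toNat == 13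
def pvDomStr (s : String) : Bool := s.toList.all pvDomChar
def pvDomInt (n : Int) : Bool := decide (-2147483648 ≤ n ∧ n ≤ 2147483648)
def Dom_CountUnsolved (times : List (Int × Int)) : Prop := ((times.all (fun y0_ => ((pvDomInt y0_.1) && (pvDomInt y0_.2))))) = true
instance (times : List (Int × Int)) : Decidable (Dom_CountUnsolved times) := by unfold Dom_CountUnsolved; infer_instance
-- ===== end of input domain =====

-- B replaces A's elif cascade over three disjoint counters by three overlapping
-- marginal counts combined with inclusion-exclusion (objective: alternative).

-- ===== PORT A =====
-- A: one loop, three disjoint counters updated by an if/elif/elif cascade.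
def CountUnsolved (times : List (Int × Int)) : Int × Int × Int :=
  let s := times.foldl
    (fun (st : Int × Int × Int) task =>
      if task.1 = 600 ∧ task.2 = 600 then (st.1 + 1, st.2.1, st.2.2)
      else if task.1 = 600 then (st.1, st.2.1 + 1, st.2.2)
      else if task.2 = 600 then (st.1, st.2.1, st.2.2 + 1)
      else st)
    (0, 0, 0)
  s

-- ===== PORT B =====
-- B: three marginal counts, then inclusion-exclusion.
def CountUnsolved_alt (times : List (Int × Int)) : Int × Int × Int :=
  let both : Int := (times.countP (fun task => task.1 == 600 && task.2 == 600) : Nat)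
  let c0 : Int := (times.countP (fun task => task.1 == 600) : Nat)
  let c1 : Int := (times.countP (fun task => task.2 == 600) : Nat)
  (both, c0 - both, c1 - both)

-- ===== PRECONDITION & SPEC =====
def Spec_CountUnsolved (times : List (Int × Int)) (out : Int × Int × Int) : Prop := out = CountUnsolved_alt times
instance (times : List (Int × Int)) (out : Int × Int × Int) : Decidable (Spec_CountUnsolved times out) := by unfold Spec_CountUnsolved; infer_instance

-- ===== CLAIM (what is proved, stated in full; the proofs are below) =====
def Claim_equal_CountUnsolved : Prop := ∀ (times : List (Int × Int)), Dom_CountUnsolved times → Spec_CountUnsolved times (CountUnsolved times)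

-- ===== LEMMAS AND PROOFS =====

theorem CountUnsolved_fold_shift (times : List (Int × Int)) (b u1 u2 : Int) :
    times.foldl
      (fun (st : Int × Int × Int) task =>
        if task.1 = 600 ∧ task.2 = 600 then (st.1 + 1, st.2.1, st.2.2)
        else if task.1 = 600 then (st.1, st.2.1 + 1, st.2.2)
        else if task.2 = 600 then (st.1, st.2.1, st.2.2 + 1)
        else st)
      (b, u1, u2)
    = (b + ((times.countP (fun task => task.1 == 600 && task.2 == 600) : Nat) : Int),
       u1 + (((times.countP (fun task => task.1 == 600) : Nat) : Int)
             - ((times.countP (fun task => task.1 == 600 && task.2 == 600) : Nat) : Int)),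
       u2 + (((times.countP (fun task => task.2 == 600) : Nat) : Int)
             - ((times.countP (fun task => task.1 == 600 && task.2 == 600) : Nat) : Int))) := by
  induction times generalizing b u1 u2 with
  | nil => simp [List.countP]
  | cons hd tl ih =>
    simp only [List.foldl_cons, List.countP_cons]
    by_cases h1 : hd.1 = 600 <;> by_cases h2 : hd.2 = 600 <;>
      simp [h1, h2, ih] <;> ring_nf

-- ===== VERDICT (by name: the statement is the Claim_ definition above) =====
theorem CountUnsolved_spec : Claim_equal_CountUnsolved := by
  intro times _
  unfold Spec_CountUnsolved CountUnsolved CountUnsolved_alt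
  simp [CountUnsolved_fold_shift]
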